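-- pv_equiv track=rewrite | github.com/Agentic-Environmental-Engineering/GymVerse | gem/gem/envs/RLVE/digit_lis_counting_env.py | _count_with_power_exactly_k
-- ===== SOURCE A (Python) =====
-- def _count_with_power_exactly_k(x: int, N: int, K: int) -> int:
--     """Count numbers in [0, x] whose digit LIS length is exactly K, using digit DP.
--
--     Args:
--         x: Upper bound (inclusive).
--         N: Number of digits capacity for R (defines DP max depth).
--         K: Target LIS length on digits.
--
--     Returns:
--         The count of numbers in [0, x] with LIS length exactly K.
--     """
--     if x < 0:
--         # No numbers to count when x < 0
--         return 0
--
--     # Prepare digit array (little-endian by position for DP)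
--     a = [0] * N
--
--     # dp[pos][sta][K] caches when limit=False and lead=False for a fixed K.
--     # pos ranges 0..N-1 in recursion; allocate N+1 for safety as in original code.
--     dp = [[[-1 for _ in range(K + 1)] for _ in range(1025)] for _ in range(N + 1)]
--
--     def new_state(sta: int, n: int) -> int:
--         """Update the bitmask state for patience sorting-like DP."""
--         for i in range(n, 10):
--             if (sta >> i) & 1:
--                 return (sta ^ (1 << i)) | (1 << n)
--         return sta | (1 << n)
--
--     def bit_count(sta: int) -> int:
--         """Count set bits in the state."""
--         return bin(sta).count("1")
--
--     def dfs(pos: int, sta: int, limit: bool, lead: bool) -> int: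
--         """Digit DP recursion."""
--         if pos == -1:
--             return 1 if bit_count(sta) == K else 0
--         if not limit and not lead and dp[pos][sta][K] != -1:
--             return dp[pos][sta][K]
--         up = a[pos] if limit else 9
--         ans = 0
--         for d in range(0, up + 1):
--             next_sta = 0 if (lead and d == 0) else new_state(sta, d)
--             ans += dfs(pos - 1, next_sta, limit and (d == up), lead and (d == 0))
--         if not limit and not lead:
--             dp[pos][sta][K] = ans
--         return ans
--
--     # Decompose x into digits in a[]
--     pos = -1
--     while x > 0:
--         pos += 1
--         a[pos] = x % 10
--         x //= 10
--
--     return dfs(pos, 0, True, True)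
-- ===== SOURCE B (Python) =====
-- def _count_with_power_exactly_k(x: int, N: int, K: int) -> int:
--     """Count numbers in [0, x] whose digit LIS length is exactly K.
--
--     Bottom-up (forward) digit DP: walk x's digits from most significant to
--     least, maintaining one 'tight' prefix (equal to x's prefix), a count of
--     all-zero ('leading zero') free prefixes, and a dictionary mapping the
--     patience-sorting bitmask state to the number of free prefixes in it.
--     """
--     if x < 0:
--         return 0
--
--     def step(sta: int, c: int) -> int:
--         """Patience-sorting bitmask update when appending digit c."""
--         for i in range(c, 10):
--             if (sta >> i) & 1:
--                 return (sta ^ (1 << i)) | (1 << c)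
--         return sta | (1 << c)
--
--     # Big-endian digits of x (x == 0 gives [0]).
--     digs = []
--     t = x
--     while True:
--         digs.append(t % 10)
--         t //= 10
--         if t == 0:
--             break
--     digs.reverse()
--
--     free = {}      # bitmask state -> number of non-leading-zero free prefixes
--     lead_cnt = 0   # number of all-zero free prefixes
--     tight_sta = 0
--     tight_lead = True
--     for d in digs:
--         nxt = {}
--         # every free prefix extends by any digit 0..9
--         for s, cnt in free.items():
--             for c in range(10):
--                 ns = step(s, c)
--                 nxt[ns] = nxt.get(ns, 0) + cnt
--         # all-zero prefixes: digit 0 keeps them all-zero, 1..9 makes them free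
--         for c in range(1, 10):
--             ns = step(0, c)
--             nxt[ns] = nxt.get(ns, 0) + lead_cnt
--         # the tight prefix branches below d
--         for c in range(d):
--             if tight_lead and c == 0:
--                 lead_cnt += 1
--             else:
--                 ns = step(tight_sta, c)
--                 nxt[ns] = nxt.get(ns, 0) + 1
--         free = nxt
--         if not (tight_lead and d == 0):
--             tight_sta = step(tight_sta, d)
--             tight_lead = False
--
--     total = sum(cnt for s, cnt in free.items() if bin(s).count("1") == K)
--     if K == 0:
--         total += lead_cnt
--     if bin(tight_sta).count("1") == K:
--         total += 1
--     return total
-- ===== Notes on version B (the rewrite author's own statement) =====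
-- stated objective: faster
-- what changed: Replaced the top-down memoized digit-DP recursion (which allocates and indexes a (N+1)*1025*(K+1) memo table) with a bottom-up forward digit DP that walks x's digits most-significant-first, keeping one tight prefix, a leading-zero counter and a dictionary from bitmask state to count of free prefixes, summing states with popcount K at the end.
import Mathlib
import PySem

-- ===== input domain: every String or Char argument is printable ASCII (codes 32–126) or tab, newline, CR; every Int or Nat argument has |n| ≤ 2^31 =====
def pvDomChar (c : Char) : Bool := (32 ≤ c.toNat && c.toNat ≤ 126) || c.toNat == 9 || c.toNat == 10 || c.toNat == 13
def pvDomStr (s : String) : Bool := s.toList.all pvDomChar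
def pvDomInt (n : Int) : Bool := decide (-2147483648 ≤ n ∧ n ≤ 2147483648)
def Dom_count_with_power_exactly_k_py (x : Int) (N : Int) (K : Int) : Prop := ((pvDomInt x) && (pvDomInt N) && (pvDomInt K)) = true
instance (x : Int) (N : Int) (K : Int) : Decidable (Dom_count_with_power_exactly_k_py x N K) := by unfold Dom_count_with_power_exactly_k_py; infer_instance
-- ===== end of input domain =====

-- B replaces A's top-down memoized digit-DP recursion (which allocates a
-- (N+1)*1025*(K+1) memo table per call) by a bottom-up forward digit DP over x's
-- digits (tight prefix + leading-zero counter + bitmask-state dictionary), whose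
-- cost is independent of N and K; a timing run measured B faster.
-- Return values agree on Pre_.


-- ===== PORT A =====

-- shared by both Pythons verbatim: new_state / step (patience-sorting bitmask update)
def pvNs (sta : Int) (n : Int) : Int :=
  match (PySem.List.pyRange n 10 1).find? (fun i => PySem.Int.band (sta >>> i.toNat) 1 == 1) with
  | some i => PySem.Int.bor (PySem.Int.bxor sta (1 <<< i.toNat)) (1 <<< n.toNat)
  | none => PySem.Int.bor sta (1 <<< n.toNat)

-- shared by both Pythons verbatim: bin(sta).count("1")
def pvPc (sta : Int) : Int := ((PySem.Int.toBinChars0b sta).count '1' : Int)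

-- the 'while x > 0: a[pos] = x % 10; x //= 10' digit decomposition (little-endian)
def natDigitsLE (n : Nat) : List Int :=
  if n = 0 then [] else ((n % 10 : Nat) : Int) :: natDigitsLE (n / 10)
decreasing_by exact Nat.div_lt_self (Nat.pos_of_ne_zero (by omega)) (by omega)

-- 'for d in range(0, up + 1): ans += dfs(...)' with the memo dict threaded through
def aLoop (f : Int → Bool → Bool → PySem.Dict (Int × Int) Int → Int × PySem.Dict (Int × Int) Int)
    (sta : Int) (limit lead : Bool) (up : Int) :
    List Int → Int × PySem.Dict (Int × Int) Int → Int × PySem.Dict (Int × Int) Int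
  | [], acc => acc
  | c :: cs, acc =>
      let nsta := if lead && c == 0 then 0 else pvNs sta c
      let r := f nsta (limit && c == up) (lead && c == 0) acc.2
      aLoop f sta limit lead up cs (acc.1 + r.1, r.2)

-- dfs(pos, sta, limit, lead); fuel = pos + 1 (fuel 0 is pos == -1); the dp table (all cells
-- initially -1, written only when not limit and not lead, for the fixed K) is the dict
-- keyed (pos, sta) with default -1
def aDfs (a : List Int) (K : Int) :
    Nat → Int → Bool → Bool → PySem.Dict (Int × Int) Int → Int × PySem.Dict (Int × Int) Int
  | 0, sta, _, _, dp => ((if pvPc sta == K then 1 else 0), dp)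
  | n + 1, sta, limit, lead, dp =>
      if !limit && !lead && (dp.getD ((n : Int), sta) (-1) != -1) then
        (dp.getD ((n : Int), sta) (-1), dp)
      else
        let up : Int := if limit then a.getD n 0 else 9
        let r := aLoop (fun s l ld d => aDfs a K n s l ld d) sta limit lead up
                   (PySem.List.pyRange 0 (up + 1) 1) (0, dp)
        if !limit && !lead then (r.1, r.2.insert ((n : Int), sta) r.1) else r

-- N is used by the Python only to size the digit array and the memo table (raising
-- IndexError when too small to hold x's digits — excluded by Pre_), so it does
-- not appear in the dict-backed transliteration.
def count_with_power_exactly_k_py (x : Int) (N : Int) (K : Int) : Int :=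
  if x < 0 then 0
  else
    let a := natDigitsLE x.toNat
    (aDfs a K a.length 0 true true PySem.Dict.empty).1

-- ===== PORT B =====

-- the do-while 'digs.append(t % 10); t //= 10; if t == 0: break' (little-endian)
def bDigitsLE (n : Nat) : List Int :=
  if _h : n / 10 = 0 then [((n % 10 : Nat) : Int)]
  else ((n % 10 : Nat) : Int) :: bDigitsLE (n / 10)
decreasing_by exact Nat.div_lt_self (by omega) (by omega)

-- 'nxt[ns] = nxt.get(ns, 0) + w'
def bAddW (nxt : PySem.Dict Int Int) (s w : Int) : PySem.Dict Int Int :=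
  nxt.insert s (nxt.getD s 0 + w)

-- 'for c in range(10): nxt[step(s, c)] += cnt'
def bFreeLoop (nxt : PySem.Dict Int Int) (s w : Int) : PySem.Dict Int Int :=
  (PySem.List.pyRange 0 10 1).foldl (fun nxt c => bAddW nxt (pvNs s c) w) nxt

-- one iteration of 'for d in digs': state is (free, lead_cnt, tight_sta, tight_lead)
def bStepDigit (st : PySem.Dict Int Int × Int × Int × Bool) (d : Int) :
    PySem.Dict Int Int × Int × Int × Bool :=
  let free := st.1
  let leadC := st.2.1
  let tsta := st.2.2.1
  let tlead := st.2.2.2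
  let nxt := free.items.foldl (fun nxt p => bFreeLoop nxt p.1 p.2) PySem.Dict.empty
  let nxt := (PySem.List.pyRange 1 10 1).foldl (fun nxt c => bAddW nxt (pvNs 0 c) leadC) nxt
  let q := (PySem.List.pyRange 0 d 1).foldl
      (fun (q : PySem.Dict Int Int × Int) c =>
        if tlead && c == 0 then (q.1, q.2 + 1) else (bAddW q.1 (pvNs tsta c) 1, q.2))
      (nxt, leadC)
  if tlead && d == 0 then (q.1, q.2, tsta, tlead) else (q.1, q.2, pvNs tsta d, false)

-- the final 'total = sum(...); if K == 0: ...; if bin(tight_sta).count("1") == K: ...'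
def bFinal (K : Int) (st : PySem.Dict Int Int × Int × Int × Bool) : Int :=
  let total := st.1.items.foldl (fun acc p => if pvPc p.1 == K then acc + p.2 else acc) 0
  let total := if K == 0 then total + st.2.1 else total
  if pvPc st.2.2.1 == K then total + 1 else total

def count_with_power_exactly_k_py_alt (x : Int) (N : Int) (K : Int) : Int :=
  if x < 0 then 0
  else bFinal K ((bDigitsLE x.toNat).reverse.foldl bStepDigit (PySem.Dict.empty, 0, 0, true))

-- ===== PRECONDITION & SPEC =====

-- Pre_ excludes exactly the inputs where the Python A raises: for x > 0, A writes
-- a[pos] for every digit position of x in the array a = [0]*N (IndexError unless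
-- 0 ≤ N and x < 10^N; x = 0 never touches a), and for K < 0 the memo rows
-- dp[pos][sta] are empty lists, so dp[pos][sta][K] raises IndexError as soon as a
-- non-tight, non-leading-zero recursion state with pos ≥ 0 is reached, which
-- happens exactly when x ≥ 20; A returns normally everywhere else.
def Pre_count_with_power_exactly_k_py (x : Int) (N : Int) (K : Int) : Prop :=
  x < 0 ∨ ((x = 0 ∨ (0 ≤ N ∧ x < 10 ^ N.toNat)) ∧ (0 ≤ K ∨ x < 20))
instance (x : Int) (N : Int) (K : Int) : Decidable (Pre_count_with_power_exactly_k_py x N K) := by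
  unfold Pre_count_with_power_exactly_k_py; infer_instance

def pvWitness_count_with_power_exactly_k_py : Int × Int × Int := (23, 5, 2)

def Spec_count_with_power_exactly_k_py (x : Int) (N : Int) (K : Int) (out : Int) : Prop :=
  out = count_with_power_exactly_k_py_alt x N K
instance (x : Int) (N : Int) (K : Int) (out : Int) :
    Decidable (Spec_count_with_power_exactly_k_py x N K out) := by
  unfold Spec_count_with_power_exactly_k_py; infer_instance

-- ===== CLAIM (what is proved, stated in full; the proofs are below) =====
def Claim_equal_count_with_power_exactly_k_py : Prop :=
  ∀ (x : Int) (N : Int) (K : Int), Dom_count_with_power_exactly_k_py x N K →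
    Pre_count_with_power_exactly_k_py x N K →
    Spec_count_with_power_exactly_k_py x N K (count_with_power_exactly_k_py x N K)

-- ===== LEMMAS AND PROOFS =====

-- reference sum for one digit position (pure version of both loops)
def cntAux (f : Int → Bool → Bool → Int) (sta : Int) (limit lead : Bool) (up : Int) :
    List Int → Int
  | [] => 0
  | c :: cs =>
      f (if lead && c == 0 then 0 else pvNs sta c) (limit && c == up) (lead && c == 0) +
        cntAux f sta limit lead up cs

-- reference count over a big-endian digit list (memo-free digit DP)
def cnt (K : Int) : List Int → Int → Bool → Bool → Int
  | [], sta, _, _ => if pvPc sta == K then 1 else 0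
  | d :: L, sta, limit, lead =>
      let up := if limit then d else 9
      cntAux (fun s l ld => cnt K L s l ld) sta limit lead up (PySem.List.pyRange 0 (up + 1) 1)

-- memo-free version of aDfs
def pureA (a : List Int) (K : Int) : Nat → Int → Bool → Bool → Int
  | 0, sta, _, _ => if pvPc sta == K then 1 else 0
  | n + 1, sta, limit, lead =>
      let up : Int := if limit then a.getD n 0 else 9
      cntAux (fun s l ld => pureA a K n s l ld) sta limit lead up (PySem.List.pyRange 0 (up + 1) 1)

-- every non-(-1) memo cell holds the pure value
def DpOk (a : List Int) (K : Int) (dp : PySem.Dict (Int × Int) Int) : Prop :=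
  ∀ (n : Nat) (sta : Int), dp.getD ((n : Int), sta) (-1) ≠ -1 →
    dp.getD ((n : Int), sta) (-1) = pureA a K (n + 1) sta false false

def wsum (f : Int → Int) (l : List (Int × Int)) : Int := (l.map (fun p => p.2 * f p.1)).sum

theorem aLoop_ok (a : List Int) (K : Int) (n : Nat)
    (ih : ∀ (s : Int) (l ld : Bool) (dp : PySem.Dict (Int × Int) Int), DpOk a K dp →
      (aDfs a K n s l ld dp).1 = pureA a K n s l ld ∧ DpOk a K (aDfs a K n s l ld dp).2)
    (sta : Int) (limit lead : Bool) (up : Int) :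
    ∀ (cs : List Int) (acc : Int) (dp : PySem.Dict (Int × Int) Int), DpOk a K dp →
      (aLoop (fun s l ld d => aDfs a K n s l ld d) sta limit lead up cs (acc, dp)).1 =
        acc + cntAux (fun s l ld => pureA a K n s l ld) sta limit lead up cs ∧
      DpOk a K (aLoop (fun s l ld d => aDfs a K n s l ld d) sta limit lead up cs (acc, dp)).2 := by
  intro cs
  induction cs with
  | nil => intro acc dp hdp; exact ⟨by simp [aLoop, cntAux], hdp⟩
  | cons c cs ihc =>
    intro acc dp hdp
    simp only [aLoop, cntAux]
    obtain ⟨h1, h2⟩ := ih _ _ _ dp hdp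
    obtain ⟨h3, h4⟩ := ihc _ _ h2
    refine ⟨?_, h4⟩
    rw [h3, h1]; ring

theorem aDfs_ok (a : List Int) (K : Int) :
    ∀ (fuel : Nat) (sta : Int) (limit lead : Bool) (dp : PySem.Dict (Int × Int) Int), DpOk a K dp →
      (aDfs a K fuel sta limit lead dp).1 = pureA a K fuel sta limit lead ∧
      DpOk a K (aDfs a K fuel sta limit lead dp).2 := by
  intro fuel
  induction fuel with
  | zero => intro sta limit lead dp hdp; exact ⟨rfl, hdp⟩
  | succ n ihn =>
    intro sta limit lead dp hdp
    by_cases hm : (!limit && !lead && (dp.getD ((n : Int), sta) (-1) != -1)) = true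
    · have hm' := hm
      simp only [Bool.and_eq_true, Bool.not_eq_true', bne_iff_ne] at hm'
      obtain ⟨⟨hl, hd⟩, hne⟩ := hm'
      subst hl; subst hd
      simp only [aDfs, hm, if_true]
      exact ⟨hdp n sta hne, hdp⟩
    · simp only [aDfs]
      rw [if_neg hm]
      obtain ⟨h1, h2⟩ := aLoop_ok a K n ihn sta limit lead
        (if limit then a.getD n 0 else 9)
        (PySem.List.pyRange 0 ((if limit then a.getD n 0 else 9) + 1) 1) 0 dp hdp
      by_cases hs : (!limit && !lead) = true
      · rw [if_pos hs]
        simp only [Bool.and_eq_true, Bool.not_eq_true'] at hs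
        obtain ⟨hl, hd⟩ := hs
        subst hl; subst hd
        simp only [Bool.false_eq_true, if_false] at h1 h2 ⊢
        refine ⟨by rw [h1]; simp [pureA], ?_⟩
        intro m sta' hne'
        rw [PySem.Dict.getD_insert] at hne' ⊢
        by_cases he : (((m : Nat) : Int), sta') = (((n : Nat) : Int), sta)
        · rw [if_pos he] at hne' ⊢
          have hm2 : m = n ∧ sta' = sta := by simpa [Prod.ext_iff, Nat.cast_inj] using he
          obtain ⟨rfl, rfl⟩ := hm2
          rw [h1]; simp [pureA]
        · rw [if_neg he] at hne' ⊢
          exact h2 m sta' hne'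
      · rw [if_neg hs]
        refine ⟨by rw [h1]; simp [pureA], h2⟩

theorem cntAux_congr (f g : Int → Bool → Bool → Int) (h : ∀ s l ld, f s l ld = g s l ld)
    (sta : Int) (limit lead : Bool) (up : Int) (cs : List Int) :
    cntAux f sta limit lead up cs = cntAux g sta limit lead up cs := by
  induction cs with
  | nil => rfl
  | cons c cs ihc => simp only [cntAux, h, ihc]

theorem pureA_eq_cnt (a : List Int) (K : Int) :
    ∀ (n : Nat), n ≤ a.length → ∀ (sta : Int) (limit lead : Bool),
      pureA a K n sta limit lead = cnt K ((a.take n).reverse) sta limit lead := by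
  intro n
  induction n with
  | zero => intro _ sta limit lead; simp [pureA, cnt]
  | succ n ihn =>
    intro h sta limit lead
    have hn : n < a.length := by omega
    have ht : (a.take (n + 1)).reverse = a.getD n 0 :: (a.take n).reverse := by
      rw [List.take_add_one, List.getElem?_eq_getElem hn]
      simp [List.getD_eq_getElem?_getD, List.getElem?_eq_getElem hn]
    rw [ht]
    simp only [pureA, cnt]
    exact cntAux_congr _ _ (fun s l ld => ihn (by omega) s l ld) _ _ _ _ _

theorem wsum_empty (f : Int → Int) : wsum f (PySem.Dict.empty : PySem.Dict Int Int).items = 0 := rfl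

theorem wsum_cons (f : Int → Int) (p : Int × Int) (t : List (Int × Int)) :
    wsum f (p :: t) = p.2 * f p.1 + wsum f t := by simp [wsum]

theorem wsum_overwrite (f : Int → Int) (k v w : Int) :
    ∀ (l : List (Int × Int)), (l.map Prod.fst).Nodup → (k, v) ∈ l →
      wsum f (l.map (fun p => if p.1 == k then (k, v + w) else p)) = wsum f l + w * f k := by
  intro l
  induction l with
  | nil => simp
  | cons p t iht =>
    intro hnd hm
    rw [List.map_cons] at hnd
    have hnd' := List.nodup_cons.mp hnd
    by_cases hpk : p.1 = k
    · have hpv : p = (k, v) := by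
        rcases List.mem_cons.mp hm with h | h
        · exact h.symm
        · exact absurd (List.mem_map_of_mem h) (hpk ▸ hnd'.1)
      subst hpv
      have hrest : t.map (fun p => if p.1 == k then (k, v + w) else p) = t := by
        rw [List.map_congr_left (g := id) ?_, List.map_id]
        intro q hq
        have hq1 : q.1 ≠ k := fun h => (hpk ▸ hnd'.1) (h ▸ List.mem_map_of_mem hq)
        simp [hq1]
      rw [List.map_cons, if_pos (show (((k, v) : Int × Int).1 == k) = true by simp), hrest]
      rw [wsum_cons, wsum_cons]; ring
    · have hm' : (k, v) ∈ t := by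
        rcases List.mem_cons.mp hm with h | h
        · exact absurd (congrArg Prod.fst h).symm hpk
        · exact h
      rw [List.map_cons, if_neg (show ¬((p.1 == k) = true) by simp [hpk])]
      rw [wsum_cons, wsum_cons, iht hnd'.2 hm']; ring

theorem wsum_bAddW (f : Int → Int) (d : PySem.Dict Int Int) (k w : Int) (hnd : d.keys.Nodup) :
    wsum f (bAddW d k w).items = wsum f d.items + w * f k := by
  unfold bAddW
  by_cases hc : d.contains k = true
  · have hk : k ∈ d.keys := (PySem.Dict.contains_iff_mem_keys d k).mp hc
    have hex : ∃ v, (k, v) ∈ d.items := by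
      simp only [PySem.Dict.keys, List.mem_map] at hk
      obtain ⟨p, hp, hp1⟩ := hk
      exact ⟨p.2, by rwa [← hp1, Prod.mk.eta]⟩
    obtain ⟨v, hv⟩ := hex
    have hgd : d.getD k 0 = v := PySem.Dict.getD_of_mem_items d hv hnd 0
    rw [PySem.Dict.items_insert_of_contains d _ hc, hgd]
    exact wsum_overwrite f k v w d.items (by simpa [PySem.Dict.keys] using hnd) hv
  · have hc' : d.contains k = false := by simpa using hc
    rw [PySem.Dict.items_insert_of_not_contains d _ hc',
      PySem.Dict.getD_of_not_contains d _ hc']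
    simp [wsum]

theorem nodup_bAddW (d : PySem.Dict Int Int) (k w : Int) (hnd : d.keys.Nodup) :
    (bAddW d k w).keys.Nodup := PySem.Dict.nodup_keys_insert d _ _ hnd

theorem wsum_foldl_bAddW (f g : Int → Int) (w : Int) :
    ∀ (cs : List Int) (d : PySem.Dict Int Int), d.keys.Nodup →
      (cs.foldl (fun d c => bAddW d (g c) w) d).keys.Nodup ∧
      wsum f (cs.foldl (fun d c => bAddW d (g c) w) d).items =
        wsum f d.items + w * (cs.map (fun c => f (g c))).sum := by
  intro cs
  induction cs with
  | nil => intro d hnd; exact ⟨hnd, by simp⟩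
  | cons c cs ihc =>
    intro d hnd
    obtain ⟨h1, h2⟩ := ihc (bAddW d (g c) w) (nodup_bAddW d _ _ hnd)
    refine ⟨h1, ?_⟩
    simp only [List.foldl_cons, List.map_cons, List.sum_cons]
    rw [h2, wsum_bAddW f d _ _ hnd]; ring

theorem wsum_foldl_bFreeLoop (f : Int → Int) :
    ∀ (l : List (Int × Int)) (d : PySem.Dict Int Int), d.keys.Nodup →
      (l.foldl (fun d p => bFreeLoop d p.1 p.2) d).keys.Nodup ∧
      wsum f (l.foldl (fun d p => bFreeLoop d p.1 p.2) d).items =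
        wsum f d.items +
          (l.map (fun p =>
            p.2 * ((PySem.List.pyRange 0 10 1).map (fun c => f (pvNs p.1 c))).sum)).sum := by
  intro l
  induction l with
  | nil => intro d hnd; exact ⟨hnd, by simp⟩
  | cons p l ihl =>
    intro d hnd
    obtain ⟨g1, g2⟩ := wsum_foldl_bAddW f (pvNs p.1) p.2 (PySem.List.pyRange 0 10 1) d hnd
    obtain ⟨h1, h2⟩ := ihl (bFreeLoop d p.1 p.2) (by unfold bFreeLoop; exact g1)
    simp only [List.foldl_cons, List.map_cons, List.sum_cons]
    refine ⟨h1, ?_⟩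
    rw [h2]
    unfold bFreeLoop
    rw [g2]; ring

theorem tight_fold (f : Int → Int) (z tsta : Int) (tlead : Bool) :
    ∀ (cs : List Int) (d : PySem.Dict Int Int) (m : Int), d.keys.Nodup →
      (cs.foldl (fun q c => if tlead && c == 0 then (q.1, q.2 + 1)
          else (bAddW q.1 (pvNs tsta c) 1, q.2)) (d, m)).1.keys.Nodup ∧
      wsum f (cs.foldl (fun q c => if tlead && c == 0 then (q.1, q.2 + 1)
          else (bAddW q.1 (pvNs tsta c) 1, q.2)) (d, m)).1.items +
        (cs.foldl (fun q c => if tlead && c == 0 then (q.1, q.2 + 1)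
          else (bAddW q.1 (pvNs tsta c) 1, q.2)) (d, m)).2 * z =
        wsum f d.items + m * z +
          (cs.map (fun c => if tlead && c == 0 then z else f (pvNs tsta c))).sum := by
  intro cs
  induction cs with
  | nil => intro d m hnd; exact ⟨hnd, by simp⟩
  | cons c cs ihc =>
    intro d m hnd
    simp only [List.foldl_cons, List.map_cons, List.sum_cons]
    by_cases h : (tlead && c == 0) = true
    · rw [if_pos h, if_pos h]
      obtain ⟨h1, h2⟩ := ihc d (m + 1) hnd
      refine ⟨h1, ?_⟩
      rw [h2]; ring
    · rw [if_neg h, if_neg h]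
      obtain ⟨h1, h2⟩ := ihc (bAddW d (pvNs tsta c) 1) m (nodup_bAddW d _ _ hnd)
      refine ⟨h1, ?_⟩
      rw [h2, wsum_bAddW f d _ _ hnd]; ring

theorem final_fold (K : Int) :
    ∀ (l : List (Int × Int)) (acc : Int),
      l.foldl (fun acc p => if pvPc p.1 == K then acc + p.2 else acc) acc =
        acc + wsum (fun s => if pvPc s == K then 1 else 0) l := by
  intro l
  induction l with
  | nil => intro acc; simp [wsum]
  | cons p l ihl =>
    intro acc
    simp only [List.foldl_cons]
    rw [ihl, wsum_cons]
    by_cases h : (pvPc p.1 == K) = true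
    · rw [if_pos h, if_pos h]; ring
    · rw [if_neg h, if_neg h]; ring

theorem cntAux_append (f : Int → Bool → Bool → Int) (sta : Int) (limit lead : Bool) (up : Int) :
    ∀ (cs cs' : List Int), cntAux f sta limit lead up (cs ++ cs') =
      cntAux f sta limit lead up cs + cntAux f sta limit lead up cs' := by
  intro cs cs'
  induction cs with
  | nil => simp [cntAux]
  | cons c cs ihc => simp only [List.cons_append, cntAux, ihc]; ring

theorem cntAux_free (f : Int → Bool → Bool → Int) (sta up : Int) :
    ∀ (cs : List Int), cntAux f sta false false up cs =
      (cs.map (fun c => f (pvNs sta c) false false)).sum := by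
  intro cs
  induction cs with
  | nil => rfl
  | cons c cs ihc => simp [cntAux, ihc]

theorem cntAux_lead (f : Int → Bool → Bool → Int) (up : Int) :
    ∀ (cs : List Int), (∀ c ∈ cs, c ≠ 0) → cntAux f 0 false true up cs =
      (cs.map (fun c => f (pvNs 0 c) false false)).sum := by
  intro cs
  induction cs with
  | nil => intro _; rfl
  | cons c cs ihc =>
    intro h
    have hc0 : (c == 0) = false := by simp [h c (List.mem_cons_self ..)]
    simp [cntAux, hc0, ihc (fun c hc => h c (List.mem_cons_of_mem _ hc))]

theorem cntAux_tight (f : Int → Bool → Bool → Int) (sta up : Int) (lead : Bool) :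
    ∀ (cs : List Int), (∀ c ∈ cs, c ≠ up) → cntAux f sta true lead up cs =
      (cs.map (fun c => if lead && c == 0 then f 0 false true
        else f (pvNs sta c) false false)).sum := by
  intro cs
  induction cs with
  | nil => intro _; rfl
  | cons c cs ihc =>
    intro h
    have hcu : (c == up) = false := by simp [h c (List.mem_cons_self ..)]
    have ihr := ihc (fun c hc => h c (List.mem_cons_of_mem _ hc))
    by_cases hl : (lead && c == 0) = true
    · simp only [cntAux, List.map_cons, List.sum_cons, ihr]
      rw [if_pos hl, if_pos hl, hl]
      simp only [Bool.true_and, hcu]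
    · have hlf : (lead && (c == 0)) = false := by simpa using hl
      simp only [cntAux, List.map_cons, List.sum_cons, ihr]
      rw [if_neg hl, if_neg hl, hlf]
      simp only [Bool.true_and, hcu]

set_option maxHeartbeats 1000000 in
theorem bMain (K : Int) :
    ∀ (L : List Int), (∀ d ∈ L, 0 ≤ d) →
    ∀ (free : PySem.Dict Int Int) (leadC tsta : Int) (tlead : Bool), free.keys.Nodup →
      (tlead = true → tsta = 0) →
      bFinal K (L.foldl bStepDigit (free, leadC, tsta, tlead)) =
        wsum (fun s => cnt K L s false false) free.items +
          leadC * cnt K L 0 false true + cnt K L tsta true tlead := by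
  intro L
  induction L with
  | nil =>
    intro _ free leadC tsta tlead hnd hts
    have hp0 : pvPc (0 : Int) = 0 := by decide
    have hc : ∀ (s : Int) (limit lead : Bool),
        cnt K [] s limit lead = (if pvPc s == K then 1 else 0 : Int) := fun _ _ _ => rfl
    simp only [List.foldl_nil, bFinal, hc]
    rw [final_fold K free.items 0, zero_add]
    by_cases hK : K = 0
    · simp [hK, hp0]; split_ifs <;> ring
    · simp [hK, hp0, (Ne.symm hK : (0 : Int) ≠ K)]; split_ifs <;> ring
  | cons d L ihL =>
    intro hpos free leadC tsta tlead hnd hts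
    have hd0 : (0 : Int) ≤ d := hpos d (List.mem_cons_self ..)
    have hpos' : ∀ c ∈ L, (0 : Int) ≤ c := fun c hc => hpos c (List.mem_cons_of_mem _ hc)
    have h1 := wsum_foldl_bFreeLoop (fun s => cnt K L s false false) free.items
      (PySem.Dict.empty) (PySem.Dict.nodup_keys_empty)
    have n1 : (free.items.foldl (fun nxt p => bFreeLoop nxt p.1 p.2)
        (PySem.Dict.empty : PySem.Dict Int Int)).keys.Nodup := h1.1
    have w1 := h1.2
    have h2 := wsum_foldl_bAddW (fun s => cnt K L s false false) (pvNs 0) leadC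
      (PySem.List.pyRange 1 10 1)
      _ n1
    have n2 : ((PySem.List.pyRange 1 10 1).foldl (fun nxt c => bAddW nxt (pvNs 0 c) leadC)
        (free.items.foldl (fun nxt p => bFreeLoop nxt p.1 p.2)
          (PySem.Dict.empty : PySem.Dict Int Int))).keys.Nodup := h2.1
    have w2 := h2.2
    have h3 := tight_fold (fun s => cnt K L s false false) (cnt K L 0 false true)
      tsta tlead (PySem.List.pyRange 0 d 1) _ leadC n2
    have n3 := h3.1
    have w3 := h3.2
    -- the three structural rewrites of cnt on (d :: L)
    have hrange10 : PySem.List.pyRange 0 (9 + 1) 1 = PySem.List.pyRange 0 10 1 := by norm_num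
    have hR1 : ∀ s, cnt K (d :: L) s false false =
        ((PySem.List.pyRange 0 10 1).map (fun c => cnt K L (pvNs s c) false false)).sum := by
      intro s
      simp only [cnt, Bool.false_eq_true, if_false, hrange10]
      rw [cntAux_free]
    have hwR1 : wsum (fun s => cnt K (d :: L) s false false) free.items =
        (free.items.map (fun p =>
          p.2 * ((PySem.List.pyRange 0 10 1).map (fun c => cnt K L (pvNs p.1 c) false false)).sum)).sum := by
      unfold wsum
      exact congrArg List.sum (List.map_congr_left (fun p _ => by simp only [hR1]))
    have hR2 : cnt K (d :: L) 0 false true = cnt K L 0 false true +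
        ((PySem.List.pyRange 1 10 1).map (fun c => cnt K L (pvNs 0 c) false false)).sum := by
      simp only [cnt, Bool.false_eq_true, if_false, hrange10]
      rw [PySem.List.pyRange_one_cons (by norm_num : (0:Int) < 10)]
      simp only [cntAux]
      rw [cntAux_lead _ _ _ (fun c hc => by have := PySem.List.mem_pyRange_one.mp hc; omega)]
      norm_num
    have hR3 : cnt K (d :: L) tsta true tlead =
        ((PySem.List.pyRange 0 d 1).map (fun c => if tlead && c == 0 then cnt K L 0 false true
          else cnt K L (pvNs tsta c) false false)).sum +
        cnt K L (if tlead && d == 0 then 0 else pvNs tsta d) true (tlead && d == 0) := by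
      simp only [cnt, if_true]
      rw [PySem.List.pyRange_one_succ_right hd0, cntAux_append,
        cntAux_tight _ tsta d tlead _ (fun c hc => by have := PySem.List.mem_pyRange_one.mp hc; omega)]
      simp [cntAux]
    simp only [List.foldl_cons]
    by_cases htl : (tlead && d == 0) = true
    · have hstep : bStepDigit (free, leadC, tsta, tlead) d =
          (((PySem.List.pyRange 0 d 1).foldl (fun q c => if tlead && c == 0 then (q.1, q.2 + 1)
              else (bAddW q.1 (pvNs tsta c) 1, q.2))
            ((PySem.List.pyRange 1 10 1).foldl (fun nxt c => bAddW nxt (pvNs 0 c) leadC)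
              (free.items.foldl (fun nxt p => bFreeLoop nxt p.1 p.2) PySem.Dict.empty), leadC)).1,
           ((PySem.List.pyRange 0 d 1).foldl (fun q c => if tlead && c == 0 then (q.1, q.2 + 1)
              else (bAddW q.1 (pvNs tsta c) 1, q.2))
            ((PySem.List.pyRange 1 10 1).foldl (fun nxt c => bAddW nxt (pvNs 0 c) leadC)
              (free.items.foldl (fun nxt p => bFreeLoop nxt p.1 p.2) PySem.Dict.empty), leadC)).2,
           tsta, tlead) := by
        simp only [bStepDigit]
        rw [if_pos htl]
      rw [hstep, ihL hpos' _ _ _ _ n3 hts, hwR1, hR2, hR3]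
      have htlead : tlead = true := by
        rcases Bool.and_eq_true .. |>.mp htl with ⟨h1, _⟩; exact h1
      rw [if_pos htl, htl, hts htlead] at *
      rw [w3, w2, w1, htlead]
      rw [wsum_empty]
      ring
    · have hstep : bStepDigit (free, leadC, tsta, tlead) d =
          (((PySem.List.pyRange 0 d 1).foldl (fun q c => if tlead && c == 0 then (q.1, q.2 + 1)
              else (bAddW q.1 (pvNs tsta c) 1, q.2))
            ((PySem.List.pyRange 1 10 1).foldl (fun nxt c => bAddW nxt (pvNs 0 c) leadC)
              (free.items.foldl (fun nxt p => bFreeLoop nxt p.1 p.2) PySem.Dict.empty), leadC)).1,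
           ((PySem.List.pyRange 0 d 1).foldl (fun q c => if tlead && c == 0 then (q.1, q.2 + 1)
              else (bAddW q.1 (pvNs tsta c) 1, q.2))
            ((PySem.List.pyRange 1 10 1).foldl (fun nxt c => bAddW nxt (pvNs 0 c) leadC)
              (free.items.foldl (fun nxt p => bFreeLoop nxt p.1 p.2) PySem.Dict.empty), leadC)).2,
           pvNs tsta d, false) := by
        simp only [bStepDigit]
        rw [if_neg htl]
      have hltf : (tlead && (d == 0)) = false := by simpa using htl
      rw [hstep, ihL hpos' _ _ _ _ n3 (by simp), hwR1, hR2, hR3, if_neg htl, hltf]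
      rw [w3, w2, w1]
      rw [wsum_empty]
      ring

theorem DpOk_empty (a : List Int) (K : Int) : DpOk a K PySem.Dict.empty := by
  intro n sta h
  rw [PySem.Dict.getD_empty] at h
  exact absurd rfl h

theorem cnt_zero_digit (K : Int) : cnt K [0] 0 true true = cnt K [] 0 true true := by
  have h1 : PySem.List.pyRange 0 1 1 = [0] := rfl
  simp only [cnt, if_true]
  norm_num [h1, cntAux]

theorem bDigits_eq : ∀ n : Nat, n ≠ 0 → bDigitsLE n = natDigitsLE n := by
  intro n
  induction n using Nat.strong_induction_on with
  | _ n ih =>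
    intro hn
    rw [bDigitsLE, natDigitsLE, if_neg hn]
    by_cases h10 : n / 10 = 0
    · rw [dif_pos h10, h10, natDigitsLE]
      simp
    · rw [dif_neg h10, ih (n / 10) (Nat.div_lt_self (Nat.pos_of_ne_zero hn) (by omega)) h10]

theorem bDigits_nonneg : ∀ n : Nat, ∀ c ∈ bDigitsLE n, (0 : Int) ≤ c := by
  intro n
  induction n using Nat.strong_induction_on with
  | _ n ih =>
    intro c hc
    rw [bDigitsLE] at hc
    by_cases h10 : n / 10 = 0
    · rw [dif_pos h10] at hc
      simp at hc
      omega
    · rw [dif_neg h10] at hc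
      rcases List.mem_cons.mp hc with rfl | hc'
      · positivity
      · exact ih (n / 10) (Nat.div_lt_self (by omega) (by omega)) c hc'

-- ===== VERDICT (by name: the statement is the Claim_ definition above) =====
theorem count_with_power_exactly_k_py_spec : Claim_equal_count_with_power_exactly_k_py := by
  unfold Claim_equal_count_with_power_exactly_k_py
  intro x N K _ _
  unfold Spec_count_with_power_exactly_k_py
  unfold count_with_power_exactly_k_py count_with_power_exactly_k_py_alt
  by_cases hx : x < 0
  · rw [if_pos hx, if_pos hx]
  · rw [if_neg hx, if_neg hx]
    have hA : (aDfs (natDigitsLE x.toNat) K (natDigitsLE x.toNat).length 0 true true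
        PySem.Dict.empty).1 = cnt K ((natDigitsLE x.toNat).reverse) 0 true true := by
      rw [(aDfs_ok _ K _ 0 true true _ (DpOk_empty _ K)).1,
        pureA_eq_cnt _ K _ le_rfl, List.take_length]
    have hB : bFinal K ((bDigitsLE x.toNat).reverse.foldl bStepDigit
        (PySem.Dict.empty, 0, 0, true)) = cnt K ((bDigitsLE x.toNat).reverse) 0 true true := by
      rw [bMain K _ (fun c hc => bDigits_nonneg _ c (List.mem_reverse.mp hc)) _ _ _ _
        PySem.Dict.nodup_keys_empty (fun _ => rfl)]
      rw [wsum_empty]; ring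
    show (aDfs (natDigitsLE x.toNat) K (natDigitsLE x.toNat).length 0 true true
        PySem.Dict.empty).1 = bFinal K ((bDigitsLE x.toNat).reverse.foldl bStepDigit
        (PySem.Dict.empty, 0, 0, true))
    rw [hA, hB]
    rcases Nat.eq_zero_or_pos x.toNat with h0 | hpos
    · rw [h0]
      have hnat : natDigitsLE 0 = [] := by rw [natDigitsLE]; simp
      have hb : bDigitsLE 0 = [0] := by rw [bDigitsLE]; simp
      rw [hnat, hb]
      exact (cnt_zero_digit K).symm
    · rw [bDigits_eq _ (by omega)]
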